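-- pv_equiv track=rewrite | github.com/ksooklall/Python-Projects | Pramp/Drone_Flight_Planner.py | droneFlightPlan
-- ===== SOURCE A (Python) =====
-- def droneFlightPlan(p):
--    current_fuel=0
--    excess_fuel=0
--    for i in range(len(p)-1):
--       if p[i+1]['z']<p[i]['z']:  # add fuel is the drone goes up
--          current_fuel+= abs(p[i+1]['z']-p[i]['z'])
--       else:                      # remove fuel is the drone goes up
--          current_fuel-=abs(p[i+1]['z']-p[i]['z'])
--
--       if current_fuel<0:                    # add excess
--          excess_fuel+=abs(current_fuel)
--    return excess_fuel
-- ===== SOURCE B (Python) =====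
-- def droneFlightPlan(p):
--     if len(p) < 2:
--         return 0
--     z0 = p[0]['z']
--     return sum(max(0, q['z'] - z0) for q in p[1:])
-- ===== Notes on version B (the rewrite author's own statement) =====
-- stated objective: simpler
-- what changed: The running current_fuel accumulator and the up/down branch are dropped: the loop telescopes to current_fuel = z0 - z[i], so B reads z0 once and returns sum(max(0, q['z'] - z0) for q in p[1:]) as a single comprehension with no maintained state.
import Mathlib
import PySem

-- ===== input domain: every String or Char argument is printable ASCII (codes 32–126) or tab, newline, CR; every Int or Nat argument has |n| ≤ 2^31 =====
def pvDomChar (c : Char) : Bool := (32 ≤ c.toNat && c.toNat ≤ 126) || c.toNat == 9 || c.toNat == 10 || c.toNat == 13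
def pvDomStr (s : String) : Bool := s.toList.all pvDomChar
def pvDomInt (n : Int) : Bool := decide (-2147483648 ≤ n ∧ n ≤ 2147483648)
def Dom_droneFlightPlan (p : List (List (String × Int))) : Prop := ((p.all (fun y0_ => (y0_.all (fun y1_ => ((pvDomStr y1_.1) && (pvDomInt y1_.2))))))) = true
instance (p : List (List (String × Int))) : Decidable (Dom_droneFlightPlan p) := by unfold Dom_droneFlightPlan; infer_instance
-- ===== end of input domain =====

-- B drops the running current_fuel accumulator and the up/down branch: the loop
-- telescopes to current_fuel = z0 - z[i], so B sums max(0, q['z'] - z0) over p[1:].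
-- Pre_ excludes exactly the inputs where Python raises KeyError (a needed dict lacks key 'z').

-- ===== PORT A =====
-- d['z'] as a Python dict lookup on the association list (last write wins, as dict(...) does);
-- the .getD 0 default is reached only outside Pre_ (Python raises KeyError there).
def pvZ (d : List (String × Int)) : Int :=
  ((PySem.Dict.ofList d).get? "z").getD 0

def droneFlightPlan (p : List (List (String × Int))) : Int :=
  -- current_fuel = st.1, excess_fuel = st.2
  (PySem.List.pyRange 0 ((p.length : Int) - 1) 1).foldl
    (fun (st : Int × Int) i =>
      let zn := pvZ (PySem.List.pyGetD p (i + 1) [])   -- p[i+1]['z']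
      let zc := pvZ (PySem.List.pyGetD p i [])         -- p[i]['z']
      let cur := if zn < zc then st.1 + |zn - zc| else st.1 - |zn - zc|
      (cur, if cur < 0 then st.2 + |cur| else st.2))
    (0, 0) |>.2

-- ===== PORT B =====
def droneFlightPlan_alt (p : List (List (String × Int))) : Int :=
  if p.length < 2 then 0
  else
    let z0 := pvZ (PySem.List.pyGetD p 0 [])
    (PySem.List.slice p (some 1) none).foldl (fun acc q => acc + max 0 (pvZ q - z0)) 0

-- ===== PRECONDITION & SPEC =====
-- Exactly the inputs on which Python A returns (no KeyError): with at most one waypoint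
-- no dict is indexed; otherwise every waypoint dict must carry key "z".
def Pre_droneFlightPlan (p : List (List (String × Int))) : Prop :=
  p.length ≤ 1 ∨ ∀ d ∈ p, ((PySem.Dict.ofList d).get? "z").isSome
instance (p : List (List (String × Int))) : Decidable (Pre_droneFlightPlan p) := by
  unfold Pre_droneFlightPlan; infer_instance
def pvWitness_droneFlightPlan : (List (List (String × Int))) :=
  [[("z", 10)], [("z", 12)], [("z", 7)]]
def Spec_droneFlightPlan (p : List (List (String × Int))) (out : Int) : Prop := out = droneFlightPlan_alt p
instance (p : List (List (String × Int))) (out : Int) : Decidable (Spec_droneFlightPlan p out) := by unfold Spec_droneFlightPlan; infer_instance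

-- ===== CLAIM (what is proved, stated in full; the proofs are below) =====
def Claim_equal_droneFlightPlan : Prop := ∀ (p : List (List (String × Int))), Dom_droneFlightPlan p → Pre_droneFlightPlan p → Spec_droneFlightPlan p (droneFlightPlan p)

-- ===== LEMMAS AND PROOFS =====

-- Proof-side restatement of A's loop as structural recursion over consecutive waypoints.
def pvRunA (zprev : Int) : List (List (String × Int)) → Int × Int → Int × Int
  | [], st => st
  | q :: qs, st =>
      let zq := pvZ q
      let cur := if zq < zprev then st.1 + |zq - zprev| else st.1 - |zq - zprev|
      pvRunA zq qs (cur, if cur < 0 then st.2 + |cur| else st.2)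

-- A's indexed foldl over range(len(p)-1) is pvRunA over the tail.
theorem pvA_eq_runA (d0 : List (String × Int)) (rest : List (List (String × Int)))
    (st : Int × Int) :
    (PySem.List.pyRange 0 (((d0 :: rest).length : Int) - 1) 1).foldl
      (fun (st : Int × Int) i =>
        let zn := pvZ (PySem.List.pyGetD (d0 :: rest) (i + 1) [])
        let zc := pvZ (PySem.List.pyGetD (d0 :: rest) i [])
        let cur := if zn < zc then st.1 + |zn - zc| else st.1 - |zn - zc|
        (cur, if cur < 0 then st.2 + |cur| else st.2))
      st = pvRunA (pvZ d0) rest st := by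
  induction rest generalizing d0 st with
  | nil => simp [PySem.List.pyRange_one_eq_nil, pvRunA]
  | cons d1 t ih =>
      rw [PySem.List.pyRange_one_cons (by simp)]
      simp only [List.foldl_cons]
      have hsh : PySem.List.pyRange (0 + 1) (((d0 :: d1 :: t).length : Int) - 1) 1
          = (PySem.List.pyRange 0 (((d1 :: t).length : Int) - 1) 1).map (fun i => i + 1) := by
        rw [PySem.List.pyRange_one, PySem.List.pyRange_one]
        simp [List.map_map, Function.comp]
        intro k _
        ring
      rw [hsh, List.foldl_map]
      rw [PySem.List.foldl_congr_mem _ _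
        (fun (st : Int × Int) i =>
          let zn := pvZ (PySem.List.pyGetD (d1 :: t) (i + 1) [])
          let zc := pvZ (PySem.List.pyGetD (d1 :: t) i [])
          let cur := if zn < zc then st.1 + |zn - zc| else st.1 - |zn - zc|
          (cur, if cur < 0 then st.2 + |cur| else st.2)) _
        (by
          intro acc k hk
          have h0 : (0 : Int) ≤ k := (PySem.List.mem_pyRange_one.mp hk).1
          have e1 : PySem.List.pyGetD (d0 :: d1 :: t) (k + 1 + 1) ([] : List (String × Int))
              = PySem.List.pyGetD (d1 :: t) (k + 1) [] := by
            rw [PySem.List.pyGetD_of_nonneg _ _ (by omega),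
                PySem.List.pyGetD_of_nonneg _ _ (by omega)]
            have : (k + 1 + 1).toNat = (k + 1).toNat + 1 := by omega
            rw [this, List.getD_cons_succ]
          have e2 : PySem.List.pyGetD (d0 :: d1 :: t) (k + 1) ([] : List (String × Int))
              = PySem.List.pyGetD (d1 :: t) k [] := by
            rw [PySem.List.pyGetD_of_nonneg _ _ (by omega),
                PySem.List.pyGetD_of_nonneg _ _ h0]
            have : (k + 1).toNat = k.toNat + 1 := by omega
            rw [this, List.getD_cons_succ]
          simp only [e1, e2])]
      rw [ih]
      have hz1 : PySem.List.pyGetD (d0 :: d1 :: t) (0 + 1) ([] : List (String × Int)) = d1 := by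
        rw [PySem.List.pyGetD_of_nonneg _ _ (by omega)]; rfl
      have hz0 : PySem.List.pyGetD (d0 :: d1 :: t) 0 ([] : List (String × Int)) = d0 := by
        rw [PySem.List.pyGetD_of_nonneg _ _ (by omega)]; rfl
      simp only [hz1, hz0]
      rfl

-- the excess component of pvRunA is B's sum, under the telescoping invariant c = z0 - zprev.
theorem pvRunA_snd (qs : List (List (String × Int))) (zprev c e z0 : Int)
    (hc : c = z0 - zprev) :
    (pvRunA zprev qs (c, e)).2
      = qs.foldl (fun acc q => acc + max 0 (pvZ q - z0)) e := by
  induction qs generalizing zprev c e with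
  | nil => simp [pvRunA]
  | cons q t ih =>
      simp only [pvRunA, List.foldl_cons]
      have hcur : (if pvZ q < zprev then c + |pvZ q - zprev| else c - |pvZ q - zprev|)
          = z0 - pvZ q := by
        rcases (by omega : zprev ≤ pvZ q ∨ pvZ q < zprev) with h | h
        · rw [if_neg (by omega), abs_of_nonneg (by omega)]; omega
        · rw [if_pos h, abs_of_neg (by omega)]; omega
      rw [hcur]
      have hex : (if z0 - pvZ q < 0 then e + |z0 - pvZ q| else e)
          = e + max 0 (pvZ q - z0) := by
        rcases (by omega : z0 - pvZ q < 0 ∨ 0 ≤ z0 - pvZ q) with h | h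
        · rw [if_pos h, abs_of_neg h]; omega
        · rw [if_neg (by omega)]; omega
      rw [hex, ih _ _ _ rfl]

-- ===== VERDICT (by name: the statement is the Claim_ definition above) =====
theorem droneFlightPlan_spec : Claim_equal_droneFlightPlan := by
  intro p _ _
  unfold Spec_droneFlightPlan droneFlightPlan droneFlightPlan_alt
  match p with
  | [] => simp [PySem.List.pyRange_one_eq_nil]
  | [d] => simp [PySem.List.pyRange_one_eq_nil]
  | d0 :: d1 :: rest =>
      rw [if_neg (by simp)]
      rw [pvA_eq_runA]
      rw [PySem.List.slice_from_one]
      simp only [PySem.List.pyGetD_zero_cons, List.tail_cons]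
      exact pvRunA_snd _ _ _ _ _ (by ring)
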